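-- pv_equiv track=rewrite | github.com/stefanpricopie/ProjectEuler | Done/pe33digitcancelfraction/pe33digitcancelfraction.py | drop_digits
-- ===== SOURCE A (Python) =====
-- def drop_digits(num, n_digits):
--     num2s = [(str(num), '')]
--
--     for _ in range(n_digits):
--         new_num2 = []
--         for num2, drop in num2s:
--             for i, d in enumerate(num2):
--                 if int(d):
--                     # no zero cancellation
--                     new_num2.append((num2[:i] + num2[i + 1:], ''.join(sorted(drop + d))))
--         num2s = list(set(new_num2))
--
--     return num2s
-- ===== SOURCE B (Python) =====
-- def drop_digits(num, n_digits):
--     # Enumerate each subset of dropped positions once (choose-or-skip the first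
--     # character), instead of expanding every drop ORDER round by round.
--     if n_digits <= 0:
--         return [(str(num), '')]
--
--     def gen(s, drop, k):
--         # pairs reachable by dropping exactly k nonzero characters of s,
--         # with drop = the sorted string of characters dropped so far
--         if k == 0:
--             return [(s, drop)]
--         if not s:
--             return []
--         c, rest = s[0], s[1:]
--         out = []
--         if int(c):
--             out += gen(rest, ''.join(sorted(drop + c)), k - 1)
--         out += [(c + r, d) for (r, d) in gen(rest, drop, k)]
--         return out
--
--     return list(set(gen(str(num), '', n_digits)))
-- ===== Notes on version B (the rewrite author's own statement) =====
-- stated objective: faster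
-- what changed: A expands drop SEQUENCES breadth-first for n_digits rounds (re-deriving each combination of dropped positions in every order, with a set() dedup per round); B enumerates each subset of dropped positions exactly once by a choose-or-skip-the-first-character recursion and dedups once at the end, and returns immediately for n_digits <= 0 or when the digits run out instead of iterating n_digits empty rounds.
import Mathlib
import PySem

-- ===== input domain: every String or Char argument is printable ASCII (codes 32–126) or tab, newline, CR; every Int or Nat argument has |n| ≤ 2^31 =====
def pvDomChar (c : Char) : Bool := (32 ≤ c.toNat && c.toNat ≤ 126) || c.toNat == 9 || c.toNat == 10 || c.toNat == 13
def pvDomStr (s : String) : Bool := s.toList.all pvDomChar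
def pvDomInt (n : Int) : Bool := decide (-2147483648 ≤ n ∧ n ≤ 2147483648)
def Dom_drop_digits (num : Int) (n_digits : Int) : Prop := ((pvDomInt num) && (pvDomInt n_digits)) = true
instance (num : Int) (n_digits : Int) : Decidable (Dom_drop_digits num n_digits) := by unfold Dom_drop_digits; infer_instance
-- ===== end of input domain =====

-- B enumerates each subset of dropped positions once (choose-or-skip recursion, one final dedup)
-- instead of A's n_digits breadth-first rounds over drop sequences; return value only, no mutation.

-- ===== PORT A =====
-- ''.join(sorted(drop + d)) — sorted over the characters, joined back (join of chars = the list itself)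
def pvIns (dr : List Char) (c : Char) : List Char :=
  PySem.List.sorted (dr ++ [c]) (fun x => x) false

-- inner loop body: "for i, d in enumerate(num2): if int(d): new_num2.append((num2[:i]+num2[i+1:], ''.join(sorted(drop+d))))"
-- (int(d) on a non-digit raises ValueError in Python: none-branch inputs are excluded by Pre_)
def pvExpandA (new_num2 : List (List Char × List Char)) (p : List Char × List Char) :
    List (List Char × List Char) :=
  (PySem.List.enumerate p.1 0).foldl
    (fun acc id =>
      match PySem.Int.ofChars? [id.2] with
      | some v =>
          if v ≠ 0 then
            acc ++ [(PySem.List.slice p.1 none (some id.1) ++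
                     PySem.List.slice p.1 (some (id.1 + 1)) none, pvIns p.2 id.2)]
          else acc
      | none => acc)
    new_num2

def drop_digits (num : Int) (n_digits : Int) : List (String × String) :=
  let init : List (List Char × List Char) := [(PySem.Int.toChars num, [])]
  let final :=
    (PySem.List.pyRange 0 n_digits 1).foldl
      (fun num2s _ => PySem.Set.ofList (num2s.foldl pvExpandA []))
      init
  final.map (fun p => (String.ofList p.1, String.ofList p.2))

-- ===== PORT B =====
-- gen(s, drop, k): pairs from dropping exactly k nonzero characters of s (choose or skip s[0])
def pvGen (s drop : List Char) (k : Nat) : List (List Char × List Char) :=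
  match k with
  | 0 => [(s, drop)]
  | k' + 1 =>
    match s with
    | [] => []
    | c :: rest =>
        (match PySem.Int.ofChars? [c] with
         | some v => if v ≠ 0 then pvGen rest (pvIns drop c) k' else []
         | none => []) ++
        (pvGen rest drop (k' + 1)).map (fun p => (c :: p.1, p.2))
termination_by (s, k)

def drop_digits_alt (num : Int) (n_digits : Int) : List (String × String) :=
  if n_digits ≤ 0 then [(String.ofList (PySem.Int.toChars num), "")]
  else
    (PySem.Set.ofList (pvGen (PySem.Int.toChars num) [] n_digits.toNat)).map
      (fun p => (String.ofList p.1, String.ofList p.2))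

-- ===== PRECONDITION & SPEC =====
-- Pre_ excludes exactly the inputs where Python A raises: for num < 0 and n_digits ≥ 1 the first
-- round calls int('-') on the sign character, a ValueError (B's gen raises there too).
def Pre_drop_digits (num : Int) (n_digits : Int) : Prop := 0 ≤ num ∨ n_digits ≤ 0
instance (num : Int) (n_digits : Int) : Decidable (Pre_drop_digits num n_digits) := by
  unfold Pre_drop_digits; infer_instance

def pvWitness_drop_digits : Int × Int := (163, 1)

def Spec_drop_digits (num : Int) (n_digits : Int) (out : List (String × String)) : Prop :=
  out = drop_digits_alt num n_digits
instance (num : Int) (n_digits : Int) (out : List (String × String)) :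
    Decidable (Spec_drop_digits num n_digits out) := by unfold Spec_drop_digits; infer_instance

-- ===== CLAIM (what is proved, stated in full; the proofs are below) =====
def Claim_equal_drop_digits : Prop :=
  ∀ (num : Int) (n_digits : Int), Dom_drop_digits num n_digits →
    Pre_drop_digits num n_digits →
    Spec_drop_digits num n_digits (drop_digits num n_digits)

-- ===== LEMMAS AND PROOFS =====

-- proof-side vocabulary
def pvH (s dr : List Char) (id : Int × Char) : List (List Char × List Char) :=
  match PySem.Int.ofChars? [id.2] with
  | some v =>
      if v ≠ 0 then
        [(PySem.List.slice s none (some id.1) ++ PySem.List.slice s (some (id.1 + 1)) none,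
          pvIns dr id.2)]
      else []
  | none => []

def pvStep (p : List Char × List Char) : List (List Char × List Char) :=
  (PySem.List.enumerate p.1 0).flatMap (pvH p.1 p.2)

def pvE (l : List (List Char × List Char)) : List (List Char × List Char) := l.flatMap pvStep

def pvEk : Nat → List (List Char × List Char) → List (List Char × List Char)
  | 0, l => l
  | k + 1, l => pvEk k (pvE l)

def pvPre (c : Char) (p : List Char × List Char) : List Char × List Char := (c :: p.1, p.2)
def pvDropC (c : Char) (p : List Char × List Char) : List Char × List Char := (p.1, pvIns p.2 c)
def pvPref (w : List Char) (p : List Char × List Char) : List Char × List Char := (w ++ p.1, p.2)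
def pvB0 (c : Char) (p : List Char × List Char) : List (List Char × List Char) :=
  match PySem.Int.ofChars? [c] with
  | some v => if v ≠ 0 then [pvDropC c p] else []
  | none => []

-- dedup-from-a-seen-set (first occurrences not in t, in order)
def pvDF (t : List (List Char × List Char)) :
    List (List Char × List Char) → List (List Char × List Char)
  | [] => []
  | x :: xs => if x ∈ t then pvDF t xs else x :: pvDF (t ++ [x]) xs

theorem pv_expandA_eq (acc : List (List Char × List Char)) (p : List Char × List Char) :
    pvExpandA acc p = acc ++ pvStep p := by
  unfold pvExpandA pvStep
  generalize PySem.List.enumerate p.1 0 = l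
  induction l generalizing acc with
  | nil => simp
  | cons id l ih =>
    rw [List.foldl_cons, List.flatMap_cons, ih]
    cases hr : PySem.Int.ofChars? [id.2] with
    | none => simp [pvH, hr]
    | some v => by_cases hv : v ≠ 0 <;> simp [pvH, hr, hv]

theorem pv_shift (dr : List Char) (s : List Char) :
    ∀ (t : List Char),
      (PySem.List.enumerate s ((t.length : Int))).flatMap (pvH (t ++ s) dr) =
        ((PySem.List.enumerate s 0).flatMap (pvH s dr)).map (pvPref t) := by
  induction s with
  | nil => intro t; simp [PySem.List.enumerate_nil]
  | cons d s' ih =>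
    intro t
    have hA : PySem.List.slice (t ++ d :: s') none (some ((t.length : Int))) = t := by
      rw [PySem.List.slice_to_natCast]
      exact List.take_left
    have hB : PySem.List.slice (t ++ d :: s') (some ((t.length : Int) + 1)) none = s' := by
      rw [show ((t.length : Int) + 1) = (((t ++ [d]).length : Nat) : Int) by simp,
        PySem.List.slice_from_natCast, show t ++ d :: s' = (t ++ [d]) ++ s' by simp]
      exact List.drop_left
    have hC : PySem.List.slice (d :: s') none (some (0 : Int)) = ([] : List Char) := by
      rw [PySem.List.slice_to (d :: s') (by omega : (0 : Int) ≤ 0)]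
      rfl
    have hD : PySem.List.slice (d :: s') (some (1 : Int)) none = s' := by
      rw [PySem.List.slice_from (d :: s') (by omega : (0 : Int) ≤ 1)]
      rfl
    have hhead : pvH (t ++ d :: s') dr ((t.length : Int), d) =
        (pvH (d :: s') dr (0, d)).map (pvPref t) := by
      unfold pvH
      cases hr : PySem.Int.ofChars? [d] with
      | none => simp
      | some v => by_cases hv : v ≠ 0 <;> simp [hv, hA, hB, hC, hD, pvPref]
    have htail : (PySem.List.enumerate s' ((t.length : Int) + 1)).flatMap (pvH (t ++ d :: s') dr)
        = ((PySem.List.enumerate s' ((0 : Int) + 1)).flatMap (pvH (d :: s') dr)).map (pvPref t) := by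
      rw [show ((t.length : Int) + 1) = (((t ++ [d]).length : Nat) : Int) by simp,
        show t ++ d :: s' = (t ++ [d]) ++ s' by simp, ih (t ++ [d]),
        show ((0 : Int) + 1) = ((([d] : List Char).length : Nat) : Int) by simp,
        show d :: s' = [d] ++ s' from rfl, ih [d], List.map_map]
      congr 1
      funext p
      simp [pvPref]
    rw [PySem.List.enumerate_cons, PySem.List.enumerate_cons]
    simp only [List.flatMap_cons, List.map_append]
    rw [hhead, htail]

theorem pv_step_cons (c : Char) (s dr : List Char) :
    pvStep (c :: s, dr) = pvB0 c (s, dr) ++ (pvStep (s, dr)).map (pvPre c) := by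
  have hC : PySem.List.slice (c :: s) none (some (0 : Int)) = ([] : List Char) := by
    rw [PySem.List.slice_to (c :: s) (by omega : (0 : Int) ≤ 0)]
    rfl
  have hD : PySem.List.slice (c :: s) (some (1 : Int)) none = s := by
    rw [PySem.List.slice_from (c :: s) (by omega : (0 : Int) ≤ 1)]
    rfl
  unfold pvStep
  show (PySem.List.enumerate (c :: s) 0).flatMap (pvH (c :: s) dr) = _
  rw [PySem.List.enumerate_cons]
  simp only [List.flatMap_cons]
  congr 1
  · unfold pvH pvB0 pvDropC
    cases hr : PySem.Int.ofChars? [c] with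
    | none => simp
    | some v => by_cases hv : v ≠ 0 <;> simp [hv, hC, hD]
  · rw [show ((0 : Int) + 1) = ((([c] : List Char).length : Nat) : Int) by simp,
      show c :: s = [c] ++ s from rfl, pv_shift dr s [c]]
    rfl

theorem pv_ins_comm (dr : List Char) (a b : Char) :
    pvIns (pvIns dr a) b = pvIns (pvIns dr b) a := by
  have key : ∀ (x y : List Char) (u v : Char), (pvIns x u).Perm y → (pvIns (pvIns x u) v).Perm (y ++ [v]) := by
    intro x y u v h
    exact (PySem.List.sorted_perm ..).trans (h.append_right [v])
  have p1 : (pvIns (pvIns dr a) b).Perm ((dr ++ [a]) ++ [b]) :=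
    key dr (dr ++ [a]) a b (PySem.List.sorted_perm ..)
  have p2 : (pvIns (pvIns dr b) a).Perm ((dr ++ [b]) ++ [a]) :=
    key dr (dr ++ [b]) b a (PySem.List.sorted_perm ..)
  have p3 : ((dr ++ [a]) ++ [b]).Perm ((dr ++ [b]) ++ [a]) := by
    rw [List.append_assoc, List.append_assoc]
    exact List.Perm.append_left dr List.perm_append_comm
  exact PySem.List.eq_of_perm_of_pairwise_le_of_injective (fun x : Char => x)
    (fun _ _ h => h) (p1.trans (p3.trans p2.symm))
    (PySem.List.sorted_pairwise ..) (PySem.List.sorted_pairwise ..)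

theorem pv_step_dropC (c : Char) (p : List Char × List Char) :
    pvStep (pvDropC c p) = (pvStep p).map (pvDropC c) := by
  have hpt : ∀ id, pvH p.1 (pvIns p.2 c) id = (pvH p.1 p.2 id).map (pvDropC c) := by
    intro id
    unfold pvH pvDropC
    cases hr : PySem.Int.ofChars? [id.2] with
    | none => simp
    | some v => by_cases hv : v ≠ 0 <;> simp [hv, pv_ins_comm]
  show (PySem.List.enumerate p.1 0).flatMap (pvH p.1 (pvIns p.2 c)) = _
  unfold pvStep
  rw [List.map_flatMap]
  exact List.flatMap_congr (fun x _ => hpt x)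

theorem pvEk_nil (k : Nat) : pvEk k [] = [] := by
  induction k with
  | zero => rfl
  | succ k ih => simpa [pvEk, pvE] using ih

theorem pvEk_append (k : Nat) (X Y : List (List Char × List Char)) :
    pvEk k (X ++ Y) = pvEk k X ++ pvEk k Y := by
  induction k generalizing X Y with
  | zero => rfl
  | succ k ih =>
    show pvEk k (pvE (X ++ Y)) = pvEk k (pvE X) ++ pvEk k (pvE Y)
    rw [show pvE (X ++ Y) = pvE X ++ pvE Y from List.flatMap_append .., ih]

theorem pvEk_add (a b : Nat) (l : List (List Char × List Char)) :
    pvEk (a + b) l = pvEk b (pvEk a l) := by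
  induction a generalizing l with
  | zero => simp [pvEk]
  | succ a ih =>
    have h : a + 1 + b = (a + b) + 1 := by omega
    rw [h]
    show pvEk (a + b) (pvE l) = pvEk b (pvEk (a + 1) l)
    rw [ih (pvE l)]
    rfl

theorem pvEk_flatMap (k : Nat) (L : List (List Char × List Char)) :
    pvEk k L = L.flatMap (fun q => pvEk k [q]) := by
  induction L with
  | nil => simp [pvEk_nil]
  | cons x L ih =>
    rw [show x :: L = [x] ++ L from rfl, pvEk_append]
    simp [ih]

theorem pvEk_mem (k : Nat) {y r : List Char × List Char} {M : List (List Char × List Char)}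
    (hy : y ∈ M) (hr : r ∈ pvEk k [y]) : r ∈ pvEk k M := by
  rw [pvEk_flatMap k M]
  exact List.mem_flatMap.mpr ⟨y, hy, hr⟩

theorem pvEk_map_dropC (k : Nat) (c : Char) (M : List (List Char × List Char)) :
    pvEk k (M.map (pvDropC c)) = (pvEk k M).map (pvDropC c) := by
  induction k generalizing M with
  | zero => rfl
  | succ k ih =>
    show pvEk k (pvE (M.map (pvDropC c))) = (pvEk k (pvE M)).map (pvDropC c)
    rw [show pvE (M.map (pvDropC c)) = (pvE M).map (pvDropC c) by
      unfold pvE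
      rw [List.map_flatMap, List.flatMap_map]
      exact List.flatMap_congr (fun x _ => pv_step_dropC c x), ih]

theorem pvB0_cases (c : Char) (p : List Char × List Char) :
    pvB0 c p = [] ∨ pvB0 c p = [pvDropC c p] := by
  unfold pvB0
  cases h : PySem.Int.ofChars? [c] with
  | none => exact Or.inl rfl
  | some v =>
    by_cases hv : v ≠ 0
    · exact Or.inr (by simp [hv])
    · exact Or.inl (by simp [hv])

-- Set.update facts
theorem pv_update_append (t X Y : List (List Char × List Char)) :
    PySem.Set.update t (X ++ Y) = PySem.Set.update (PySem.Set.update t X) Y := by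
  simp [PySem.Set.update, List.foldl_append]

theorem pv_mem_update {y : List Char × List Char} {t : List (List Char × List Char)}
    (X : List (List Char × List Char)) (h : y ∈ t) : y ∈ PySem.Set.update t X := by
  exact (PySem.Set.mem_update ..).mpr (Or.inl h)

theorem pv_mem_update_of_mem {y : List Char × List Char} (t : List (List Char × List Char))
    {X : List (List Char × List Char)} (h : y ∈ X) : y ∈ PySem.Set.update t X := by
  exact (PySem.Set.mem_update ..).mpr (Or.inr h)

theorem pv_update_absorb {t X : List (List Char × List Char)} (h : ∀ y ∈ X, y ∈ t) :
    PySem.Set.update t X = t := by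
  induction X generalizing t with
  | nil => rfl
  | cons x X ih =>
    show PySem.Set.update (PySem.Set.add t x) X = t
    rw [PySem.Set.add_of_mem (h x (List.mem_cons_self ..))]
    exact ih (fun y hy => h y (List.mem_cons_of_mem _ hy))

theorem pv_update_eq_append_DF (l : List (List Char × List Char)) :
    ∀ t, PySem.Set.update t l = t ++ pvDF t l := by
  induction l with
  | nil => intro t; simp [pvDF, PySem.Set.update]
  | cons x l ih =>
    intro t
    show PySem.Set.update (PySem.Set.add t x) l = t ++ pvDF t (x :: l)
    by_cases hx : x ∈ t
    · rw [PySem.Set.add_of_mem hx, ih t]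
      simp [pvDF, hx]
    · rw [PySem.Set.add_of_not_mem hx, ih (t ++ [x])]
      simp [pvDF, hx]

theorem pv_ofList_eq_DF (l : List (List Char × List Char)) :
    PySem.Set.ofList l = pvDF [] l := by
  have h := pv_update_eq_append_DF l []
  simpa [PySem.Set.update, PySem.Set.ofList_eq_foldl] using h

-- dedup commutes with one expansion round
theorem pv_DF_flatMap (l : List (List Char × List Char)) :
    ∀ (t s : List (List Char × List Char)),
      (∀ a ∈ t, ∀ y ∈ pvStep a, y ∈ s) →
      PySem.Set.update s ((pvDF t l).flatMap pvStep) = PySem.Set.update s (l.flatMap pvStep) := by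
  induction l with
  | nil => intro t s h; rfl
  | cons a l ih =>
    intro t s h
    by_cases ha : a ∈ t
    · rw [show pvDF t (a :: l) = pvDF t l by simp [pvDF, ha], ih t s h,
        List.flatMap_cons, pv_update_append,
        pv_update_absorb (fun y hy => h a ha y hy)]
    · rw [show pvDF t (a :: l) = a :: pvDF (t ++ [a]) l by simp [pvDF, ha],
        List.flatMap_cons, List.flatMap_cons, pv_update_append, pv_update_append,
        ih (t ++ [a]) (PySem.Set.update s (pvStep a))]
      intro b hb y hy
      rcases List.mem_append.mp hb with hb | hb
      · exact pv_mem_update _ (h b hb y hy)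
      · rw [List.mem_singleton.mp hb] at hy
        exact pv_mem_update_of_mem _ hy

theorem pv_ofList_E_ofList (l : List (List Char × List Char)) :
    PySem.Set.ofList (pvE (PySem.Set.ofList l)) = PySem.Set.ofList (pvE l) := by
  have h := pv_DF_flatMap l [] [] (by intro a ha; cases ha)
  rw [pv_ofList_eq_DF l]
  unfold pvE
  calc PySem.Set.ofList ((pvDF [] l).flatMap pvStep)
      = PySem.Set.update [] ((pvDF [] l).flatMap pvStep) := by
        simp [PySem.Set.update, PySem.Set.ofList_eq_foldl]
    _ = PySem.Set.update [] (l.flatMap pvStep) := h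
    _ = PySem.Set.ofList (l.flatMap pvStep) := by
        simp [PySem.Set.update, PySem.Set.ofList_eq_foldl]

-- the zero/non-digit character is never dropped: prefixing it commutes with expansion exactly
theorem pvS0 (c : Char) (h0 : ∀ p, pvB0 c p = []) (k : Nat) :
    ∀ L, pvEk k (L.map (pvPre c)) = (pvEk k L).map (pvPre c) := by
  induction k with
  | zero => intro L; simp [pvEk]
  | succ k ih =>
    intro L
    show pvEk k (pvE (L.map (pvPre c))) = (pvEk k (pvE L)).map (pvPre c)
    rw [show pvE (L.map (pvPre c)) = (pvE L).map (pvPre c) by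
      unfold pvE
      rw [List.map_flatMap, List.flatMap_map]
      apply List.flatMap_congr
      intro x _
      have hx : pvStep (pvPre c x) = pvB0 c x ++ (pvStep x).map (pvPre c) :=
        pv_step_cons c x.1 x.2
      rw [hx, h0]
      rfl, ih (pvE L)]

theorem pvEk_succ_single (k : Nat) (p : List Char × List Char) :
    pvEk (k + 1) [p] = pvEk k (pvStep p) := by
  show pvEk k (pvE [p]) = _
  rw [show pvE [p] = pvStep p by simp [pvE]]

theorem pvGen_zero (s dr : List Char) : pvGen s dr 0 = [(s, dr)] := by
  rw [pvGen]

theorem pvGen_nil (dr : List Char) (k : Nat) : pvGen [] dr (k + 1) = [] := by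
  rw [pvGen]

theorem pvGen_cons (c : Char) (rest dr : List Char) (k : Nat) :
    pvGen (c :: rest) dr (k + 1) =
      (match PySem.Int.ofChars? [c] with
       | some v => if v ≠ 0 then pvGen rest (pvIns dr c) k else []
       | none => []) ++
      (pvGen rest dr (k + 1)).map (fun p => (c :: p.1, p.2)) := by
  rw [pvGen]

theorem pv_map_pref (w : List Char) (c : Char) (X : List (List Char × List Char)) :
    (X.map (pvPre c)).map (pvPref w) = X.map (pvPref (w ++ [c])) := by
  rw [List.map_map]
  apply List.map_congr_left
  intro p _
  simp [pvPre, pvPref]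

theorem pv_map_pref' (w : List Char) (c : Char) (X : List (List Char × List Char)) :
    X.map (fun p => pvPref w (pvPre c p)) = X.map (pvPref (w ++ [c])) := by
  apply List.map_congr_left
  intro p _
  simp [pvPre, pvPref]

-- core: modulo a seen-set t that already contains every "c dropped later" completion,
-- expanding c-prefixed states equals prefixing the expansions with c
theorem pvS (k : Nat) :
    ∀ (c : Char) (w : List Char) (L t : List (List Char × List Char)),
      (∀ j, j < k → ∀ q ∈ pvEk j L, ∀ r ∈ pvEk (k - 1 - j) [pvDropC c q],
        pvPref w r ∈ t) →
      PySem.Set.update t ((pvEk k (L.map (pvPre c))).map (pvPref w)) =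
      PySem.Set.update t ((pvEk k L).map (fun p => pvPref w (pvPre c p))) := by
  induction k with
  | zero =>
    intro c w L t _
    simp [pvEk, List.map_map, Function.comp_def]
  | succ k ihk =>
    intro c w L
    induction L with
    | nil =>
      intro t _
      simp [pvEk_nil]
    | cons x L ihL =>
      intro t hc
      have hsplit : pvEk (k + 1) ((x :: L).map (pvPre c)) =
          pvEk k (pvB0 c x) ++ pvEk k ((pvStep x).map (pvPre c)) ++ pvEk (k + 1) (L.map (pvPre c)) := by
        rw [List.map_cons, show pvPre c x :: L.map (pvPre c) = [pvPre c x] ++ L.map (pvPre c) from rfl,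
          pvEk_append, pvEk_succ_single,
          show pvStep (pvPre c x) = pvB0 c x ++ (pvStep x).map (pvPre c) from pv_step_cons c x.1 x.2,
          pvEk_append]
      have hsplitR : pvEk (k + 1) (x :: L) = pvEk k (pvStep x) ++ pvEk (k + 1) L := by
        rw [show x :: L = [x] ++ L from rfl, pvEk_append, pvEk_succ_single]
      rw [hsplit, hsplitR, List.map_append, List.map_append, List.map_append,
        pv_update_append, pv_update_append, pv_update_append]
      have hB1 : PySem.Set.update t ((pvEk k (pvB0 c x)).map (pvPref w)) = t := by
        rcases pvB0_cases c x with h0 | h0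
        · rw [h0, pvEk_nil]
          rfl
        · rw [h0]
          apply pv_update_absorb
          intro y hy
          rcases List.mem_map.mp hy with ⟨r, hr, rfl⟩
          have := hc 0 (by omega) x (by simp [pvEk]) r (by simpa using hr)
          exact this
      rw [hB1]
      have hB2 : PySem.Set.update t ((pvEk k ((pvStep x).map (pvPre c))).map (pvPref w)) =
          PySem.Set.update t ((pvEk k (pvStep x)).map (fun p => pvPref w (pvPre c p))) := by
        apply ihk c w (pvStep x) t
        intro j hj q hq r hr
        have hqx : q ∈ pvEk (j + 1) (x :: L) := by
          apply pvEk_mem (j + 1) (List.mem_cons_self ..)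
          rw [pvEk_succ_single]
          exact hq
        have hr' : r ∈ pvEk (k + 1 - 1 - (j + 1)) [pvDropC c q] := by
          rw [show k + 1 - 1 - (j + 1) = k - 1 - j by omega]
          exact hr
        exact hc (j + 1) (by omega) q hqx r hr'
      rw [hB2]
      apply ihL
      intro j hj q hq r hr
      apply pv_mem_update
      apply hc j hj q _ r hr
      rw [show x :: L = [x] ++ L from rfl, pvEk_append]
      exact List.mem_append_right _ hq

-- main: first-occurrence dedup of A's breadth-first drop sequences equals that of B's
-- choose-or-skip combination enumeration
theorem pvT (s : List Char) :
    ∀ (k : Nat) (dr w : List Char) (t : List (List Char × List Char)),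
      PySem.Set.update t ((pvEk k [(s, dr)]).map (pvPref w)) =
      PySem.Set.update t ((pvGen s dr k).map (pvPref w)) := by
  induction s with
  | nil =>
    intro k dr w t
    cases k with
    | zero =>
      rw [pvGen_zero]
      rfl
    | succ k =>
      rw [pvGen_nil, pvEk_succ_single,
        show pvStep (([] : List Char), dr) = [] by simp [pvStep, PySem.List.enumerate_nil],
        pvEk_nil]
  | cons c rest ih =>
    intro k dr w t
    cases k with
    | zero =>
      rw [pvGen_zero]
      rfl
    | succ k =>
      have hsplit : pvEk (k + 1) [((c :: rest), dr)] =
          pvEk k (pvB0 c (rest, dr)) ++ pvEk k ((pvStep (rest, dr)).map (pvPre c)) := by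
        rw [pvEk_succ_single, pv_step_cons c rest dr, pvEk_append]
      rw [hsplit, pvGen_cons, List.map_append, List.map_append, pv_update_append, pv_update_append]
      cases hr : PySem.Int.ofChars? [c] with
      | none =>
        have h0 : ∀ p, pvB0 c p = [] := by
          intro p
          unfold pvB0
          rw [hr]
        rw [h0, pvEk_nil, show PySem.Set.update t (List.map (pvPref w) []) = t from rfl,
          pvS0 c h0 k (pvStep (rest, dr)), pv_map_pref,
          show pvEk k (pvStep (rest, dr)) = pvEk (k + 1) [(rest, dr)] from (pvEk_succ_single ..).symm,
          ih (k + 1) dr (w ++ [c]) t,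
          show (pvGen rest dr (k + 1)).map (fun p => (c :: p.1, p.2)) = (pvGen rest dr (k + 1)).map (pvPre c) from rfl,
          pv_map_pref]
      | some v =>
        by_cases hv : v ≠ 0
        · have h0 : pvB0 c (rest, dr) = [((rest, pvIns dr c))] := by
            unfold pvB0
            rw [hr]
            simp [hv, pvDropC]
          have hIH1 : PySem.Set.update t ((pvEk k [(rest, pvIns dr c)]).map (pvPref w)) =
              PySem.Set.update t ((pvGen rest (pvIns dr c) k).map (pvPref w)) :=
            ih k (pvIns dr c) w t
          rw [h0, hIH1]
          have hfirst : (match (some v : Option Int) with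
              | some v => if v ≠ 0 then pvGen rest (pvIns dr c) k else []
              | none => ([] : List (List Char × List Char))) = pvGen rest (pvIns dr c) k := by
            simp [hv]
          rw [hfirst]
          set t1 := PySem.Set.update t ((pvGen rest (pvIns dr c) k).map (pvPref w)) with ht1
          have hB2 : PySem.Set.update t1 ((pvEk k ((pvStep (rest, dr)).map (pvPre c))).map (pvPref w)) =
              PySem.Set.update t1 ((pvEk k (pvStep (rest, dr))).map (fun p => pvPref w (pvPre c p))) := by
            apply pvS k c w (pvStep (rest, dr)) t1
            intro j hj q hq r hr2
            have hq1 : q ∈ pvEk (j + 1) [(rest, dr)] := by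
              rw [pvEk_succ_single]
              exact hq
            have hdq : pvDropC c q ∈ pvEk (j + 1) [(rest, pvIns dr c)] := by
              have e : ([((rest, pvIns dr c))] : List (List Char × List Char)) =
                  [((rest, dr))].map (pvDropC c) := rfl
              rw [e, pvEk_map_dropC]
              exact List.mem_map_of_mem hq1
            have hrk : r ∈ pvEk k [(rest, pvIns dr c)] := by
              have h1 : r ∈ pvEk (k - 1 - j) (pvEk (j + 1) [(rest, pvIns dr c)]) :=
                pvEk_mem _ hdq hr2
              rw [← pvEk_add] at h1
              rw [show (j + 1) + (k - 1 - j) = k by omega] at h1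
              exact h1
            have : pvPref w r ∈ PySem.Set.update t ((pvEk k [(rest, pvIns dr c)]).map (pvPref w)) :=
              pv_mem_update_of_mem _ (List.mem_map_of_mem hrk)
            rw [hIH1] at this
            exact this
          rw [hB2, pv_map_pref',
            show pvEk k (pvStep (rest, dr)) = pvEk (k + 1) [(rest, dr)] from (pvEk_succ_single ..).symm,
            ih (k + 1) dr (w ++ [c]) t1,
            show (pvGen rest dr (k + 1)).map (fun p => (c :: p.1, p.2)) = (pvGen rest dr (k + 1)).map (pvPre c) from rfl,
            pv_map_pref]
        · have h0 : ∀ p, pvB0 c p = [] := by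
            intro p
            unfold pvB0
            rw [hr]
            simp [hv]
          have hfirst : (match (some v : Option Int) with
              | some v => if v ≠ 0 then pvGen rest (pvIns dr c) k else []
              | none => ([] : List (List Char × List Char))) = [] := by
            simp [hv]
          rw [h0, pvEk_nil, hfirst, show PySem.Set.update t (List.map (pvPref w) []) = t from rfl,
            pvS0 c h0 k (pvStep (rest, dr)), pv_map_pref,
            show pvEk k (pvStep (rest, dr)) = pvEk (k + 1) [(rest, dr)] from (pvEk_succ_single ..).symm,
            ih (k + 1) dr (w ++ [c]) t,
            show (pvGen rest dr (k + 1)).map (fun p => (c :: p.1, p.2)) = (pvGen rest dr (k + 1)).map (pvPre c) from rfl,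
            pv_map_pref]

theorem pv_round_eq (l : List (List Char × List Char)) : l.foldl pvExpandA [] = pvE l := by
  rw [show pvExpandA = fun acc p => acc ++ pvStep p from
    funext fun a => funext fun p => pv_expandA_eq a p]
  simpa using PySem.List.foldl_append_eq_flatMap pvStep l []

theorem pvEk_succ' (m : Nat) (l : List (List Char × List Char)) :
    pvEk (m + 1) l = pvE (pvEk m l) := by
  rw [pvEk_add m 1 l]
  rfl

theorem pv_foldl_const (g : List (List Char × List Char) → List (List Char × List Char))
    (r : List Int) : ∀ init, r.foldl (fun l _ => g l) init = g^[r.length] init := by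
  induction r with
  | nil => intro init; rfl
  | cons a r ih =>
    intro init
    rw [List.foldl_cons, ih, List.length_cons, Function.iterate_succ_apply]

theorem pv_iter (k : Nat) (init : List (List Char × List Char)) :
    (fun l => PySem.Set.ofList (pvE l))^[k] init =
      if k = 0 then init else PySem.Set.ofList (pvEk k init) := by
  induction k with
  | zero => rfl
  | succ k ih =>
    rw [Function.iterate_succ_apply', ih]
    cases k with
    | zero => rfl
    | succ k =>
      rw [if_neg (by omega), if_neg (by omega)]
      show PySem.Set.ofList (pvE (PySem.Set.ofList (pvEk (k + 1) init))) = _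
      rw [pv_ofList_E_ofList, ← pvEk_succ']

theorem pv_rounds (n : Int) (init : List (List Char × List Char)) :
    (PySem.List.pyRange 0 n 1).foldl
        (fun num2s _ => PySem.Set.ofList (num2s.foldl pvExpandA [])) init =
      if n ≤ 0 then init else PySem.Set.ofList (pvEk n.toNat init) := by
  by_cases hn0 : n ≤ 0
  · rw [PySem.List.pyRange_one_eq_nil (by omega), if_pos hn0]
    rfl
  · rw [if_neg hn0,
      show (fun (num2s : List (List Char × List Char)) (_ : Int) =>
          PySem.Set.ofList (num2s.foldl pvExpandA [])) =
        fun num2s _ => PySem.Set.ofList (pvE num2s) from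
          funext fun l => funext fun _ => by rw [pv_round_eq],
      pv_foldl_const (fun l => PySem.Set.ofList (pvE l)) _ init,
      PySem.List.length_pyRange_one, pv_iter,
      show ((n - 0).toNat = n.toNat) by omega, if_neg (by omega : ¬ n.toNat = 0)]

-- ===== VERDICT (by name: the statement is the Claim_ definition above) =====
theorem drop_digits_spec : Claim_equal_drop_digits := by
  intro num n _dom _pre
  show drop_digits num n = drop_digits_alt num n
  have hupd : ∀ (l : List (List Char × List Char)), PySem.Set.update [] l = PySem.Set.ofList l :=
    fun l => (PySem.Set.ofList_eq_foldl l).symm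
  have hid : ∀ (X : List (List Char × List Char)), X.map (pvPref []) = X := by
    intro X
    rw [show pvPref ([] : List Char) = id from funext fun p => rfl, List.map_id]
  by_cases hn : n ≤ 0
  · simp only [drop_digits, drop_digits_alt, if_pos hn, pv_rounds]
    simp
  · simp only [drop_digits, drop_digits_alt, if_neg hn, pv_rounds]
    have h := pvT (PySem.Int.toChars num) n.toNat [] [] []
    rw [hupd, hupd, hid, hid] at h
    rw [h]
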